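-- pv_equiv track=rewrite | github.com/aarushi211/Heterogeneous-Multi-Agent-Debate- | metrics/dst_metrics.py | _match_judge_verdict
-- ===== SOURCE A (Python) =====
-- from typing import Optional
--
-- def _match_judge_verdict(planted_lie: str, judge_verdicts: list[dict]) -> Optional[dict]:
--     """
--     Find the Judge's verdict entry for a given planted_lie.
--     Checks both 'claim' and 'lie' keys, with fuzzy fallback.
--     This fixes the silent mismatch when Judge uses 'claim' instead of 'lie'.
--     """
--     needle = planted_lie.lower()[:50]
--
--     # Pass 1: exact prefix match on 'claim' or 'lie'
--     for jv in judge_verdicts: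
--         claim = (jv.get("claim") or jv.get("lie") or "").lower()
--         if claim[:50] == needle or needle in claim or claim in needle:
--             return jv
--
--     # Pass 2: looser 20-char overlap
--     needle_short = needle[:20]
--     for jv in judge_verdicts:
--         claim = (jv.get("claim") or jv.get("lie") or "").lower()
--         if needle_short in claim or claim[:20] in needle:
--             return jv
--
--     return None
-- ===== SOURCE B (Python) =====
-- from typing import Optional
--
-- def _match_judge_verdict(planted_lie: str, judge_verdicts: list[dict]) -> Optional[dict]:
--     """Single pass: return the first strict match immediately; remember the
--     first loose match as a fallback and return it (or None) after the loop."""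
--     needle = planted_lie.lower()[:50]
--     needle_short = needle[:20]
--     fallback = None
--     for jv in judge_verdicts:
--         claim = (jv.get("claim") or jv.get("lie") or "").lower()
--         if claim[:50] == needle or needle in claim or claim in needle:
--             return jv
--         if fallback is None and (needle_short in claim or claim[:20] in needle):
--             fallback = jv
--     return fallback
-- ===== Notes on version B (the rewrite author's own statement) =====
-- stated objective: alternative
-- what changed: Replaces A's two sequential scans of judge_verdicts with one single-pass loop that returns a strict match immediately and carries the first loose match as a fallback variable.
import Mathlib
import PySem

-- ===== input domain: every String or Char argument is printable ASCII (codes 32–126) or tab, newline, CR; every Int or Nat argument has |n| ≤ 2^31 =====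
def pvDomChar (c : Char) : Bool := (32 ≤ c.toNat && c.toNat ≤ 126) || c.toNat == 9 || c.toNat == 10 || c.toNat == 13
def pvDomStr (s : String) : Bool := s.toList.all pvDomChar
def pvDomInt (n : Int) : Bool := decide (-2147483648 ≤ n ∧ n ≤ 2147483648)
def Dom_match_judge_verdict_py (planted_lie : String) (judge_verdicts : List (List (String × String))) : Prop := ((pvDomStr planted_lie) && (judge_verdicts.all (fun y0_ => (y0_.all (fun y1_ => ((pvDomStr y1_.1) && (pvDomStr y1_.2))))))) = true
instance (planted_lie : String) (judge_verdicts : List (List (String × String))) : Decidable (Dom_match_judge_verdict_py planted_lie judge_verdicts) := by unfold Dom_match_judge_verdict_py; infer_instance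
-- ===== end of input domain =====

-- B replaces A's two sequential scans with one single-pass loop carrying a fallback variable (objective: alternative decomposition).

-- ===== PORT A =====
-- Python truthiness of `opt or y` for strings: None and "" fall through to y.
def mjvOrStr (o : Option String) (y : String) : String :=
  match o with
  | some s => if s = "" then y else s
  | none => y

-- claim = (jv.get("claim") or jv.get("lie") or "").lower()
def mjvClaimOf (jv : List (String × String)) : String :=
  PySem.Str.lower (mjvOrStr ((PySem.Dict.mk jv).get? "claim") (mjvOrStr ((PySem.Dict.mk jv).get? "lie") ""))

-- claim[:50] == needle or needle in claim or claim in needle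
def mjvStrict (needle claim : String) : Bool :=
  decide (PySem.Str.slice claim none (some 50) = needle) || PySem.Str.isIn needle claim || PySem.Str.isIn claim needle

-- needle_short in claim or claim[:20] in needle
def mjvLoose (needleShort needle claim : String) : Bool :=
  PySem.Str.isIn needleShort claim || PySem.Str.isIn (PySem.Str.slice claim none (some 20)) needle

-- Pass 1 of A
def mjvPass1 (needle : String) : List (List (String × String)) → Option (List (String × String))
  | [] => none
  | jv :: rest => if mjvStrict needle (mjvClaimOf jv) then some jv else mjvPass1 needle rest

-- Pass 2 of A
def mjvPass2 (needleShort needle : String) : List (List (String × String)) → Option (List (String × String))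
  | [] => none
  | jv :: rest => if mjvLoose needleShort needle (mjvClaimOf jv) then some jv else mjvPass2 needleShort needle rest

def match_judge_verdict_py (planted_lie : String) (judge_verdicts : List (List (String × String))) : Option (List (String × String)) :=
  let needle := PySem.Str.slice (PySem.Str.lower planted_lie) none (some 50)
  match mjvPass1 needle judge_verdicts with
  | some jv => some jv
  | none => mjvPass2 (PySem.Str.slice needle none (some 20)) needle judge_verdicts

-- ===== PORT B =====
-- single loop: return a strict match at once, carry the first loose match as fallback
def mjvLoop (needle needleShort : String) (fb : Option (List (String × String))) :
    List (List (String × String)) → Option (List (String × String))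
  | [] => fb
  | jv :: rest =>
    let claim := mjvClaimOf jv
    if mjvStrict needle claim then some jv
    else mjvLoop needle needleShort (if fb.isNone && mjvLoose needleShort needle claim then some jv else fb) rest

def match_judge_verdict_py_alt (planted_lie : String) (judge_verdicts : List (List (String × String))) : Option (List (String × String)) :=
  let needle := PySem.Str.slice (PySem.Str.lower planted_lie) none (some 50)
  let needleShort := PySem.Str.slice needle none (some 20)
  mjvLoop needle needleShort none judge_verdicts

-- ===== PRECONDITION & SPEC =====
def Spec_match_judge_verdict_py (planted_lie : String) (judge_verdicts : List (List (String × String))) (out : Option (List (String × String))) : Prop := out = match_judge_verdict_py_alt planted_lie judge_verdicts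
instance (planted_lie : String) (judge_verdicts : List (List (String × String))) (out : Option (List (String × String))) : Decidable (Spec_match_judge_verdict_py planted_lie judge_verdicts out) := by unfold Spec_match_judge_verdict_py; infer_instance

-- ===== CLAIM (what is proved, stated in full; the proofs are below) =====
def Claim_equal_match_judge_verdict_py : Prop := ∀ (planted_lie : String) (judge_verdicts : List (List (String × String))), Dom_match_judge_verdict_py planted_lie judge_verdicts → Spec_match_judge_verdict_py planted_lie judge_verdicts (match_judge_verdict_py planted_lie judge_verdicts)

-- ===== LEMMAS AND PROOFS =====
-- The loop with fallback fb equals: first strict match if any, else fb, else first loose match.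
theorem mjvLoop_eq (needle needleShort : String) (fb : Option (List (String × String)))
    (l : List (List (String × String))) :
    mjvLoop needle needleShort fb l =
      match mjvPass1 needle l with
      | some jv => some jv
      | none => match fb with
        | some x => some x
        | none => mjvPass2 needleShort needle l := by
  induction l generalizing fb with
  | nil => cases fb <;> simp [mjvLoop, mjvPass1, mjvPass2]
  | cons jv rest ih =>
    by_cases hs : mjvStrict needle (mjvClaimOf jv) = true
    · simp [mjvLoop, mjvPass1, hs]
    · cases fb with
      | some x => simp [mjvLoop, mjvPass1, hs, ih]
      | none =>
        by_cases hl : mjvLoose needleShort needle (mjvClaimOf jv) = true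
        · simp [mjvLoop, mjvPass1, mjvPass2, hs, hl, ih]
        · simp [mjvLoop, mjvPass1, mjvPass2, hs, hl, ih]

-- ===== VERDICT (by name: the statement is the Claim_ definition above) =====
theorem match_judge_verdict_py_spec : Claim_equal_match_judge_verdict_py := by
  intro planted_lie judge_verdicts _
  unfold Spec_match_judge_verdict_py match_judge_verdict_py match_judge_verdict_py_alt
  rw [mjvLoop_eq]
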